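-- pv_equiv track=rewrite | github.com/dennisjlee/adventofcode | aoc2024/day17.py | compute
-- ===== SOURCE A (Python) =====
-- def compute(a: int):
--     output: list[int] = []
--     while a:
--         b = (a % 8) ^ 1
--         c = a // (2**b)
--         a //= 8
--         b = b ^ 4 ^ c
--         output.append(b % 8)
--     return output
-- ===== SOURCE B (Python) =====
-- # Table-driven: the emitted digit depends only on the low 10 bits of the current
-- # value, so precompute a 1024-entry lookup table once, then recurse 3 bits at a time.
-- def _table():
--     t = []
--     for cur in range(1024):
--         b = (cur % 8) ^ 1
--         t.append((b ^ 4 ^ (cur >> b)) % 8)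
--     return t
--
--
-- _TABLE = _table()
--
--
-- def compute(a: int):
--     if a == 0:
--         return []
--     return [_TABLE[a & 1023]] + compute(a >> 3)
-- ===== Notes on version B (the rewrite author's own statement) =====
-- stated objective: alternative
-- what changed: Replaces A's per-iteration bit twiddling inside a mutating while-loop by a 1024-entry lookup table precomputed once (the emitted digit depends only on the low 10 bits of the current value) and a recursion that indexes the table with a & 1023 and recurses on a >> 3; Pre_ excludes a < 0, where A's while-loop never terminates (a //= 8 stalls at -1).
import Mathlib
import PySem

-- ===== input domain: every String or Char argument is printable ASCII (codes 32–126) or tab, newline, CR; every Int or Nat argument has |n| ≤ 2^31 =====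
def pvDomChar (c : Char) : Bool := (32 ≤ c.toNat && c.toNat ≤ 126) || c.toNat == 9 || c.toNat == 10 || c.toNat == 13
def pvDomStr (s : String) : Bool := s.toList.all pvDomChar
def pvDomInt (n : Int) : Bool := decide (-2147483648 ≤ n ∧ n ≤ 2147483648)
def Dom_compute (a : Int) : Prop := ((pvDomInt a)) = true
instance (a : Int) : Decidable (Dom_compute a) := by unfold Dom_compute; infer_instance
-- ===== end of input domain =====

-- B replaces A's per-iteration bit twiddling by a 1024-entry lookup table built once
-- (the emitted digit depends only on the low 10 bits of the current value) and a
-- recursion consuming 3 bits per step; objective: alternative, not faster.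

-- ===== PORT A =====
-- A's `while a:` loop as fuel recursion; fuel a.toNat + 1 never runs out when 0 ≤ a
-- (the loop variable strictly decreases); for a < 0 the Python loop never terminates
-- (excluded by Pre_compute), so exhausting fuel there claims nothing.
def computeGo : Nat → Int → List Int
  | 0, _ => []
  | fuel + 1, a =>
    if a = 0 then []
    else
      let b := PySem.Int.bxor (PySem.Int.mod a 8) 1
      -- 2**b : b = (a % 8) ^ 1 lies in [0,7], so (2:Int) ^ b.toNat is exact
      let c := PySem.Int.floordiv a ((2 : Int) ^ b.toNat)
      let a' := PySem.Int.floordiv a 8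
      let b' := PySem.Int.bxor (PySem.Int.bxor b 4) c
      PySem.Int.mod b' 8 :: computeGo fuel a'

def compute (a : Int) : List Int := computeGo (a.toNat + 1) a

-- ===== PORT B =====
-- Source B's _table(): the loop over range(1024) appending one entry per cur;
-- `cur >> b` : b = (cur % 8) ^ 1 ∈ [0,7] and cur ≥ 0, so b.toNat is exact
def pvTable : List Int :=
  (PySem.List.pyRange 0 1024 1).foldl
    (fun t cur =>
      let b := PySem.Int.bxor (PySem.Int.mod cur 8) 1
      t ++ [PySem.Int.mod (PySem.Int.bxor (PySem.Int.bxor b 4) (Int.shiftRight cur b.toNat)) 8])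
    []

-- Source B's recursive compute as fuel recursion (fuel a.toNat + 1 suffices for 0 ≤ a;
-- on a < 0 the Python recursion never terminates, excluded by Pre_compute).
-- _TABLE[a & 1023]: the index is always in [0, 1023], so the IndexError branch
-- (pyGet? = none) is unreachable and .getD 0 is exact.
def computeAltGo : Nat → Int → List Int
  | 0, _ => []
  | fuel + 1, a =>
    if a = 0 then []
    else
      [(PySem.List.pyGet? pvTable (PySem.Int.band a 1023)).getD 0]
        ++ computeAltGo fuel (Int.shiftRight a 3)

def compute_alt (a : Int) : List Int := computeAltGo (a.toNat + 1) a

-- ===== PRECONDITION & SPEC =====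
-- Pre_ excludes a < 0, on which Python A never returns (the while-loop runs forever:
-- `a //= 8` stalls at -1), so those inputs are outside the claim.
def Pre_compute (a : Int) : Prop := 0 ≤ a
instance (a : Int) : Decidable (Pre_compute a) := by unfold Pre_compute; infer_instance
def pvWitness_compute : Int := (117440)

def Spec_compute (a : Int) (out : List Int) : Prop := out = compute_alt a
instance (a : Int) (out : List Int) : Decidable (Spec_compute a out) := by unfold Spec_compute; infer_instance

-- ===== CLAIM (what is proved, stated in full; the proofs are below) =====
def Claim_equal_compute : Prop := ∀ (a : Int), Dom_compute a → Pre_compute a → Spec_compute a (compute a)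

-- ===== LEMMAS AND PROOFS =====

-- the digit emitted from current value m, in Nat arithmetic
def digitN (m : Nat) : Nat :=
  ((((m % 8) ^^^ 1) ^^^ 4) ^^^ (m >>> ((m % 8) ^^^ 1))) % 8

-- reference list: the digits of m, by the recursion both ports follow
def specGo (m : Nat) : List Int :=
  if h : m = 0 then [] else (digitN m : Int) :: specGo (m / 8)
decreasing_by exact Nat.div_lt_self (Nat.pos_of_ne_zero h) (by norm_num)

-- the Int-level digit expression both ports contain, on a Nat cast, is digitN
lemma digit_cast (m : Nat) :
    PySem.Int.mod (PySem.Int.bxor (PySem.Int.bxor (PySem.Int.bxor (PySem.Int.mod (m:Int) 8) 1) 4)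
      (Int.shiftRight (m:Int) (PySem.Int.bxor (PySem.Int.mod (m:Int) 8) 1).toNat)) 8
    = ((digitN m : Nat) : Int) := by
  have h8 : PySem.Int.mod (m:Int) 8 = ((m % 8 : Nat) : Int) := by
    exact_mod_cast PySem.Int.mod_natCast m 8
  have hb : PySem.Int.bxor ((m % 8 : Nat) : Int) 1 = (((m % 8) ^^^ 1 : Nat) : Int) := by
    exact_mod_cast PySem.Int.bxor_natCast (m % 8) 1
  have h4 : PySem.Int.bxor (((m % 8) ^^^ 1 : Nat) : Int) 4 = ((((m % 8) ^^^ 1) ^^^ 4 : Nat) : Int) := by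
    exact_mod_cast PySem.Int.bxor_natCast ((m % 8) ^^^ 1) 4
  have hs : Int.shiftRight (m:Int) ((m % 8) ^^^ 1) = ((m >>> ((m % 8) ^^^ 1) : Nat) : Int) := by
    rw [show Int.shiftRight (m:Int) ((m % 8) ^^^ 1) = ((m:Int) >>> ((m % 8) ^^^ 1)) from rfl,
      ← Int.natCast_shiftRight]
  rw [h8, hb, h4, Int.toNat_natCast, hs]
  rw [show PySem.Int.bxor ((((m % 8) ^^^ 1) ^^^ 4 : Nat) : Int) ((m >>> ((m % 8) ^^^ 1) : Nat) : Int)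
      = (((((m % 8) ^^^ 1) ^^^ 4) ^^^ (m >>> ((m % 8) ^^^ 1)) : Nat) : Int) from
    PySem.Int.bxor_natCast _ _]
  rw [digitN]
  exact_mod_cast PySem.Int.mod_natCast _ 8

lemma shift_eq_floordiv_pow (m j : Nat) :
    Int.shiftRight (m : Int) j = PySem.Int.floordiv (m : Int) ((2 : Int) ^ j) := by
  rw [show Int.shiftRight (m : Int) j = ((m : Int) >>> j) from rfl,
    ← Int.natCast_shiftRight, Nat.shiftRight_eq_div_pow]
  have h2 : ((2 : Int) ^ j) = ((2 ^ j : Nat) : Int) := by push_cast; ring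
  rw [h2, PySem.Int.floordiv_natCast]

lemma floordiv_eight (m : Nat) :
    PySem.Int.floordiv (m : Int) 8 = ((m / 8 : Nat) : Int) := by
  exact_mod_cast PySem.Int.floordiv_natCast m 8

-- A's loop computes specGo
lemma computeGo_eq_specGo : ∀ (f m : Nat), m < f → computeGo f (m : Int) = specGo m := by
  intro f
  induction f with
  | zero => intro m h; omega
  | succ f ih =>
    intro m h
    by_cases hm : m = 0
    · subst hm; simp [computeGo, specGo]
    · simp only [computeGo]
      rw [if_neg (by exact_mod_cast hm)]
      rw [floordiv_eight]
      rw [ih (m / 8) (by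
        have := Nat.div_lt_self (Nat.pos_of_ne_zero hm) (show 1 < 8 by norm_num)
        omega)]
      have hspec : specGo m = (digitN m : Int) :: specGo (m / 8) := by
        rw [specGo]; exact dif_neg hm
      rw [hspec]
      congr 1
      rw [← shift_eq_floordiv_pow m _]
      exact digit_cast m

-- the table lookup at an in-range index is the digit expression at that index
lemma pvTable_lookup (r : Nat) (hr : r < 1024) :
    (PySem.List.pyGet? pvTable ((r:Nat):Int)).getD 0
    = PySem.Int.mod (PySem.Int.bxor (PySem.Int.bxor (PySem.Int.bxor (PySem.Int.mod (r:Int) 8) 1) 4)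
      (Int.shiftRight (r:Int) (PySem.Int.bxor (PySem.Int.mod (r:Int) 8) 1).toNat)) 8 := by
  rw [pvTable, PySem.List.foldl_append_singleton_eq_map, List.nil_append,
    PySem.List.pyGet?_natCast, show (1024:Int) = ((1024:Nat):Int) from rfl,
    PySem.List.getElem?_map_pyRange_zero _ 1024 r hr]
  rfl

lemma xor_mod8 (u x y : Nat) (h : x % 8 = y % 8) : (u ^^^ x) % 8 = (u ^^^ y) % 8 := by
  have e : ∀ z : Nat, z % 8 = z &&& 7 := fun z => by
    have := Nat.and_two_pow_sub_one_eq_mod z 3; simpa using this.symm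
  rw [e, e, Nat.and_xor_distrib_right, Nat.and_xor_distrib_right, ← e x, ← e y, h]

lemma shift_mod8 (m b : Nat) (hb : b < 8) : ((m % 1024) >>> b) % 8 = (m >>> b) % 8 := by
  rw [Nat.shiftRight_eq_div_pow, Nat.shiftRight_eq_div_pow]
  interval_cases b <;> norm_num <;> omega

-- the digit depends only on the low 10 bits of the current value
lemma digit_low (m : Nat) : digitN (m &&& 1023) = digitN m := by
  have h1023 : m &&& 1023 = m % 1024 := by
    have := Nat.and_two_pow_sub_one_eq_mod m 10; simpa using this
  rw [h1023, digitN, digitN]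
  have hm8 : m % 1024 % 8 = m % 8 := by omega
  rw [hm8]
  exact xor_mod8 _ _ _ (shift_mod8 m (m % 8 ^^^ 1) (by
    have h8 : m % 8 < 8 := by omega
    have := Nat.xor_lt_two_pow (n := 3) (show m % 8 < 2^3 by omega) (show 1 < 2^3 by norm_num)
    simpa using this))

-- B's recursion computes specGo too
lemma computeAltGo_eq_specGo : ∀ (f m : Nat), m < f → computeAltGo f (m : Int) = specGo m := by
  intro f
  induction f with
  | zero => intro m h; omega
  | succ f ih =>
    intro m h
    by_cases hm : m = 0
    · subst hm; simp [computeAltGo, specGo]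
    · simp only [computeAltGo]
      rw [if_neg (by exact_mod_cast hm)]
      have hshift3 : Int.shiftRight (m : Int) 3 = ((m / 8 : Nat) : Int) := by
        rw [show Int.shiftRight (m : Int) 3 = ((m : Int) >>> (3:Nat)) from rfl,
          ← Int.natCast_shiftRight, Nat.shiftRight_eq_div_pow]
      rw [hshift3, ih (m / 8) (by
        have := Nat.div_lt_self (Nat.pos_of_ne_zero hm) (show 1 < 8 by norm_num)
        omega)]
      have hspec : specGo m = (digitN m : Int) :: specGo (m / 8) := by
        rw [specGo]; exact dif_neg hm
      have hband : PySem.Int.band (m : Int) 1023 = ((m &&& 1023 : Nat) : Int) := by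
        exact_mod_cast PySem.Int.band_natCast m 1023
      have hhead : (PySem.List.pyGet? pvTable (PySem.Int.band (m : Int) 1023)).getD 0
          = ((digitN m : Nat) : Int) := by
        rw [hband, pvTable_lookup (m &&& 1023) (by
          have := Nat.and_le_right (n := m) (m := 1023); omega),
          digit_cast, digit_low]
      rw [hspec, List.singleton_append, hhead]

-- ===== VERDICT (by name: the statement is the Claim_ definition above) =====
theorem compute_spec : Claim_equal_compute := by
  intro a _ hpre
  unfold Spec_compute
  obtain ⟨m, rfl⟩ : ∃ m : Nat, a = (m : Int) := ⟨a.toNat, (Int.toNat_of_nonneg hpre).symm⟩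
  rw [compute, compute_alt, Int.toNat_natCast,
    computeGo_eq_specGo (m + 1) m (by omega), computeAltGo_eq_specGo (m + 1) m (by omega)]
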